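-- pv_equiv track=rewrite | github.com/ericskim/redax | redax/utils/bv.py | bv_interval
-- ===== SOURCE A (Python) =====
-- from typing import Sequence, Iterable, List
--
-- BitVector = Sequence[bool]
--
-- def int2bv(index: int, nbits: int) -> BitVector:
--     """
--     A really high nbits just right pads the bitvector with "False"
--     """
--
--     return tuple(True if ((index >> i) % 2 == 1) else False
--                  for i in range(nbits - 1, -1, -1)
--                  )
--
-- def increment_index(index: int, increment: int, nbits=None, graycode=False):
--     if graycode:
--         assert nbits is not None
--         index = graytobin(index)
--         index = (index + increment) % 2**nbits
--         return bintogray(index)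
--     else:
--         return index + increment
--
-- def bv_interval(lb, ub, graycode=False) -> Iterable[BitVector]:
--     assert len(lb) == len(ub)
--     nbits = len(lb)
--     if not graycode and lb > ub:
--         return []
--
--     lb = bv2int(lb)
--     ub = bv2int(ub)
--
--     return (int2bv(x, nbits) for x in index_interval(lb, ub, nbits, graycode))
--
-- def index_interval(lb: int, ub: int, nbits=None, graycode=False) -> List[int]:
--     """Construct an integer interval that includes both ends lb and ub."""
--     if graycode:
--         assert nbits is not None
--     else:
--         assert lb <= ub
--
--     window = []
--     i = lb
--     while True:
--         window.append(i)
--         if i == ub: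
--             break
--         i = increment_index(i, 1, nbits, graycode)
--     return window
--
-- def bv2int(bv: BitVector) -> int:
--     """
--     Converts bitvector (list or tuple) with the standard binary encoding into an integer.
--     """
--     nbits = len(bv)
--     index = 0
--     for i in range(nbits):
--         if bv[i]:
--             index += 2**(nbits - i - 1)
--     return index
--
-- def bintogray(x: int) -> int:
--     """
--     Convert a binary encoded positive integer into gray code.
--     """
--     assert x >= 0
--     return x ^ (x >> 1)
--
-- def graytobin(x: int) -> int:
--     """
--     Convert a gray code encoded positive integer into the standard binary encoding.
--     """
--     assert x >= 0
--     mask = x >> 1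
--     while(mask != 0):
--         x = x ^ mask
--         mask = mask >> 1
--     return x
-- ===== SOURCE B (Python) =====
-- from typing import Sequence, Iterable
--
-- BitVector = Sequence[bool]
--
--
-- def _bits2int(bv):
--     n = 0
--     for b in bv:
--         n = n * 2 + (1 if b else 0)
--     return n
--
--
-- def _int2bv(x, nbits):
--     out = []
--     for _ in range(nbits):
--         out.append(x % 2 == 1)
--         x //= 2
--     return tuple(reversed(out))
--
--
-- def _graytobin(x):
--     b = 0
--     while x:
--         b ^= x
--         x >>= 1
--     return b
--
--
-- def _gray_stream(c, hi, nbits):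
--     # c is a plain binary counter; emit its gray code (mod 2**nbits) until we hit hi
--     while True:
--         g = (c % (1 << nbits)) ^ ((c % (1 << nbits)) >> 1)
--         yield _int2bv(g, nbits)
--         if g == hi:
--             return
--         c += 1
--
--
-- def bv_interval(lb, ub, graycode=False) -> Iterable[BitVector]:
--     assert len(lb) == len(ub)
--     nbits = len(lb)
--     lo = _bits2int(lb)
--     hi = _bits2int(ub)
--     if graycode:
--         return _gray_stream(_graytobin(lo), hi, nbits)
--     if lo > hi:
--         return []
--     return (_int2bv(x, nbits) for x in range(lo, hi + 1))
-- ===== Notes on version B (the rewrite author's own statement) =====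
-- stated objective: alternative
-- what changed: The non-gray branch becomes a direct range(lo, hi+1) map instead of the generic increment loop, and the gray branch maintains a plain monotone binary counter converted to gray once per step, instead of round-tripping the gray value through graytobin/bintogray on every increment; bit conversions are done by structural folds instead of index arithmetic over ranges.
import Mathlib
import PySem

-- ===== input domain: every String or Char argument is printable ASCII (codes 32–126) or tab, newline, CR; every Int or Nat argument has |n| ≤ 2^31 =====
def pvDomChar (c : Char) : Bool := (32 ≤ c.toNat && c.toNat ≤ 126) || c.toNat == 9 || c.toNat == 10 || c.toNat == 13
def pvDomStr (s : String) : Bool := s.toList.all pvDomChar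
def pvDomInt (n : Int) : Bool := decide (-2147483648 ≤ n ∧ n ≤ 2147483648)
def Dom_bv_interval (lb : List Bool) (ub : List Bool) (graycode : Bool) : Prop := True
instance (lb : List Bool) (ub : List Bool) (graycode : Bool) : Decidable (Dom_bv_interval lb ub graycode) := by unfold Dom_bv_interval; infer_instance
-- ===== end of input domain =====

-- B replaces the generic increment loop by a direct range map (non-gray) and a monotone
-- binary counter converted to gray once per step (gray); equivalence of return values only
-- (both Pythons return a lazy generator on the enumerating branches).

-- ===== PORT A =====
-- all integers arising here are nonnegative bitvector encodings, ported as Nat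

def int2bv (index : Nat) (nbits : Nat) : List Bool :=
  ((List.range nbits).reverse).map (fun i => decide ((index >>> i) % 2 = 1))

def bv2int (bv : List Bool) : Nat :=
  (List.range bv.length).foldl
    (fun index i => if bv.getD i false then index + 2 ^ (bv.length - i - 1) else index) 0

def bintogray (x : Nat) : Nat := x ^^^ (x >>> 1)

def gtb_go (x : Nat) (mask : Nat) : Nat :=
  if mask = 0 then x else gtb_go (x ^^^ mask) (mask >>> 1)
termination_by mask
decreasing_by rename_i h; rw [Nat.shiftRight_one]; omega

def graytobin (x : Nat) : Nat := gtb_go x (x >>> 1)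

def increment_index (index : Nat) (inc : Nat) (nbits : Nat) (graycode : Bool) : Nat :=
  if graycode then bintogray ((graytobin index + inc) % 2 ^ nbits)
  else index + inc

-- the Python `while True` loop; the fuel only makes it total (it visits each of the
-- 2^nbits indices at most once before hitting ub, so fuel 2^nbits is never exhausted)
def ii_go (fuel : Nat) (i ub nbits : Nat) (graycode : Bool) : List Nat :=
  match fuel with
  | 0 => []
  | f + 1 =>
    if i = ub then [i]
    else i :: ii_go f (increment_index i 1 nbits graycode) ub nbits graycode

def index_interval (lb ub nbits : Nat) (graycode : Bool) : List Nat :=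
  ii_go (2 ^ nbits) lb ub nbits graycode

-- Python's `lb > ub` on lists of bools (lexicographic, False < True)
def pyListGt : List Bool → List Bool → Bool
  | [], [] => false
  | [], _ :: _ => false
  | _ :: _, [] => true
  | a :: as, b :: bs => if a = b then pyListGt as bs else (a && !b)

-- `assert len(lb) == len(ub)` raises AssertionError on unequal lengths: excluded by Pre_
def bv_interval (lb : List Bool) (ub : List Bool) (graycode : Bool) : List (List Bool) :=
  let nbits := lb.length
  if !graycode && pyListGt lb ub then []
  else (index_interval (bv2int lb) (bv2int ub) nbits graycode).map (fun x => int2bv x nbits)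

-- ===== PORT B =====

def bits2int (bv : List Bool) : Nat :=
  bv.foldl (fun n b => n * 2 + (if b then 1 else 0)) 0

def i2bvGo : Nat → Nat → List Bool
  | 0, _ => []
  | n + 1, x => decide (x % 2 = 1) :: i2bvGo n (x / 2)

def int2bv_alt (x : Nat) (nbits : Nat) : List Bool := (i2bvGo nbits x).reverse

def gtb_alt (x : Nat) (b : Nat) : Nat :=
  if x = 0 then b else gtb_alt (x >>> 1) (b ^^^ x)
termination_by x
decreasing_by rename_i h; rw [Nat.shiftRight_one]; omega

-- the `while True` generator of Source B; fuel 2^nbits only makes it total (never exhausted)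
def grayGo (fuel : Nat) (c hi nbits : Nat) : List (List Bool) :=
  match fuel with
  | 0 => []
  | f + 1 =>
    let g := (c % 2 ^ nbits) ^^^ ((c % 2 ^ nbits) >>> 1)
    int2bv_alt g nbits :: (if g = hi then [] else grayGo f (c + 1) hi nbits)

def bv_interval_alt (lb : List Bool) (ub : List Bool) (graycode : Bool) : List (List Bool) :=
  let nbits := lb.length
  let lo := bits2int lb
  let hi := bits2int ub
  if graycode then grayGo (2 ^ nbits) (gtb_alt lo 0) hi nbits
  else if hi < lo then []
  else (List.range (hi + 1 - lo)).map (fun k => int2bv_alt (lo + k) nbits)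

-- ===== PRECONDITION & SPEC =====
-- A asserts len(lb) == len(ub) (AssertionError otherwise): exactly those inputs are excluded
def Pre_bv_interval (lb : List Bool) (ub : List Bool) (graycode : Bool) : Prop :=
  lb.length = ub.length
instance (lb : List Bool) (ub : List Bool) (graycode : Bool) : Decidable (Pre_bv_interval lb ub graycode) := by unfold Pre_bv_interval; infer_instance

def pvWitness_bv_interval : List Bool × List Bool × Bool := ([false, true], [true, false], true)

def Spec_bv_interval (lb : List Bool) (ub : List Bool) (graycode : Bool) (out : List (List Bool)) : Prop := out = bv_interval_alt lb ub graycode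
instance (lb : List Bool) (ub : List Bool) (graycode : Bool) (out : List (List Bool)) : Decidable (Spec_bv_interval lb ub graycode out) := by unfold Spec_bv_interval; infer_instance

-- ===== CLAIM (what is proved, stated in full; the proofs are below) =====
def Claim_equal_bv_interval : Prop := ∀ (lb : List Bool) (ub : List Bool) (graycode : Bool), Dom_bv_interval lb ub graycode → Pre_bv_interval lb ub graycode → Spec_bv_interval lb ub graycode (bv_interval lb ub graycode)

-- ===== LEMMAS AND PROOFS =====

-- prefix xor: pxor x = x ^^^ (x >>> 1) ^^^ (x >>> 2) ^^^ …, the common closed form of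
-- A's graytobin loop and B's gray-to-binary accumulator
def pxor (x : Nat) : Nat :=
  if x = 0 then 0 else x ^^^ pxor (x >>> 1)
termination_by x
decreasing_by rename_i h; rw [Nat.shiftRight_one]; omega

theorem pxor_eq (x : Nat) (h : x ≠ 0) : pxor x = x ^^^ pxor (x >>> 1) := by
  conv_lhs => rw [pxor]
  rw [if_neg h]

theorem pxor_shiftRight (x : Nat) : pxor x >>> 1 = pxor (x >>> 1) := by
  induction x using Nat.strong_induction_on with
  | _ x ih =>
    by_cases h : x = 0
    · subst h; simp [pxor]
    · rw [pxor_eq x h, Nat.shiftRight_xor_distrib,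
        ih (x >>> 1) (by rw [Nat.shiftRight_one]; omega)]
      by_cases h1 : x >>> 1 = 0
      · rw [h1]; simp [pxor]
      · rw [pxor_eq (x >>> 1) h1]

theorem pxor_bintogray (x : Nat) : pxor (x ^^^ (x >>> 1)) = x := by
  induction x using Nat.strong_induction_on with
  | _ x ih =>
    by_cases h : x = 0
    · subst h; simp [pxor]
    · have hne : x ^^^ (x >>> 1) ≠ 0 := by
        intro h0
        have := Nat.eq_of_xor_eq_zero h0
        rw [Nat.shiftRight_one] at this; omega
      rw [pxor_eq _ hne, Nat.shiftRight_xor_distrib, ← Nat.shiftRight_add]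
      have h2 : x >>> (1 + 1) = (x >>> 1) >>> 1 := by rw [Nat.shiftRight_add]
      rw [h2, ih (x >>> 1) (by rw [Nat.shiftRight_one]; omega)]
      rw [Nat.xor_assoc, Nat.xor_self, Nat.xor_zero]

theorem bintogray_pxor (x : Nat) : pxor x ^^^ (pxor x >>> 1) = x := by
  rw [pxor_shiftRight]
  by_cases h : x = 0
  · subst h; simp [pxor]
  · rw [pxor_eq x h, Nat.xor_assoc, Nat.xor_self, Nat.xor_zero]

theorem pxor_lt {x n : Nat} (h : x < 2 ^ n) : pxor x < 2 ^ n := by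
  induction x using Nat.strong_induction_on with
  | _ x ih =>
    by_cases h0 : x = 0
    · subst h0; simpa [pxor] using h
    · rw [pxor_eq x h0]
      have hlt : x >>> 1 < x := by rw [Nat.shiftRight_one]; omega
      exact Nat.xor_lt_two_pow h (ih (x >>> 1) hlt (lt_trans hlt h))

theorem gtb_go_eq (mask : Nat) : ∀ x, gtb_go x mask = x ^^^ pxor mask := by
  induction mask using Nat.strong_induction_on with
  | _ mask ih =>
    intro x
    by_cases h : mask = 0
    · subst h; simp [gtb_go, pxor]
    · rw [gtb_go, if_neg h, ih (mask >>> 1) (by rw [Nat.shiftRight_one]; omega),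
        pxor_eq mask h, Nat.xor_assoc]

theorem graytobin_eq (x : Nat) : graytobin x = pxor x := by
  rw [graytobin, gtb_go_eq]
  by_cases h : x = 0
  · subst h; simp [pxor]
  · rw [pxor_eq x h]

theorem gtb_alt_eq (x : Nat) : ∀ b, gtb_alt x b = b ^^^ pxor x := by
  induction x using Nat.strong_induction_on with
  | _ x ih =>
    intro b
    by_cases h : x = 0
    · subst h; simp [gtb_alt, pxor]
    · rw [gtb_alt, if_neg h, ih (x >>> 1) (by rw [Nat.shiftRight_one]; omega),
        pxor_eq x h, Nat.xor_assoc]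

-- the common structural value of both bitvector decoders
def numMSB : List Bool → Nat
  | [] => 0
  | b :: bs => (if b then 2 ^ bs.length else 0) + numMSB bs

theorem numMSB_lt (bv : List Bool) : numMSB bv < 2 ^ bv.length := by
  induction bv with
  | nil => simp [numMSB]
  | cons b bs ih =>
    simp only [numMSB, List.length_cons, pow_succ]
    split_ifs <;> omega

theorem bits2int_go (bv : List Bool) : ∀ acc,
    bv.foldl (fun n b => n * 2 + (if b then 1 else 0)) acc = acc * 2 ^ bv.length + numMSB bv := by
  induction bv with
  | nil => intro acc; simp [numMSB]
  | cons b bs ih =>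
    intro acc
    simp only [List.foldl_cons, ih, numMSB, List.length_cons, pow_succ]
    split_ifs <;> ring

theorem bits2int_eq (bv : List Bool) : bits2int bv = numMSB bv := by
  rw [bits2int, bits2int_go]; simp

theorem bv2int_sum (bv : List Bool) :
    ((List.range bv.length).map
      (fun i => if bv.getD i false then 2 ^ (bv.length - i - 1) else 0)).sum = numMSB bv := by
  induction bv with
  | nil => simp [numMSB]
  | cons b bs ih =>
    rw [List.length_cons, List.range_succ_eq_map, List.map_cons, List.map_map, List.sum_cons]
    have ht : List.map ((fun i => if (b :: bs).getD i false then 2 ^ (bs.length + 1 - i - 1) else 0) ∘ Nat.succ) (List.range bs.length)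
        = List.map (fun i => if bs.getD i false then 2 ^ (bs.length - i - 1) else 0) (List.range bs.length) := by
      apply List.map_congr_left
      intro i _
      have harg : bs.length + 1 - (i + 1) - 1 = bs.length - i - 1 := by omega
      simp [Function.comp, Nat.succ_eq_add_one]
    rw [ht, ih]
    simp [numMSB]

theorem bv2int_eq (bv : List Bool) : bv2int bv = numMSB bv := by
  rw [bv2int, ← bv2int_sum]
  have key : ∀ (l : List Nat) (acc : Nat),
      l.foldl (fun index i => if bv.getD i false then index + 2 ^ (bv.length - i - 1) else index) acc
      = acc + (l.map (fun i => if bv.getD i false then 2 ^ (bv.length - i - 1) else 0)).sum := by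
    intro l
    induction l with
    | nil => intro acc; simp
    | cons x xs ih =>
      intro acc
      rw [List.foldl_cons, List.map_cons, List.sum_cons]
      split_ifs with hx
      · rw [ih]; omega
      · rw [ih]; omega
  rw [key]
  simp

theorem pyListGt_iff (lb : List Bool) : ∀ (ub : List Bool), lb.length = ub.length →
    pyListGt lb ub = decide (numMSB ub < numMSB lb) := by
  induction lb with
  | nil =>
    intro ub h
    cases ub with
    | nil => simp [pyListGt, numMSB]
    | cons b bs => simp at h
  | cons a as ih =>
    intro ub h
    cases ub with
    | nil => simp at h
    | cons b bs =>
      have hlen : as.length = bs.length := by simpa using h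
      by_cases hab : a = b
      · subst hab
        have hiff : (numMSB (a :: bs) < numMSB (a :: as)) ↔ (numMSB bs < numMSB as) := by
          simp only [numMSB, hlen]
          omega
        rw [show pyListGt (a :: as) (a :: bs) = pyListGt as bs from by simp [pyListGt],
          ih bs hlen]
        exact (decide_eq_decide).mpr hiff.symm
      · cases a <;> cases b
        · exact absurd rfl hab
        · have hx : ¬ (numMSB (true :: bs) < numMSB (false :: as)) := by
            have h1 := numMSB_lt as
            rw [hlen] at h1
            simp only [numMSB]
            simp
            omega
          simp [pyListGt, hx]
        · have hx : numMSB (false :: bs) < numMSB (true :: as) := by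
            have h1 := numMSB_lt bs
            rw [← hlen] at h1
            simp only [numMSB]
            simp
            omega
          simp [pyListGt, hx]
        · exact absurd rfl hab

theorem i2bvGo_eq (n : Nat) : ∀ x,
    i2bvGo n x = (List.range n).map (fun i => decide ((x >>> i) % 2 = 1)) := by
  induction n with
  | zero => intro x; simp [i2bvGo]
  | succ n ih =>
    intro x
    rw [List.range_succ_eq_map, List.map_cons, List.map_map]
    rw [show i2bvGo (n + 1) x = decide (x % 2 = 1) :: i2bvGo n (x / 2) from rfl]
    refine List.cons_eq_cons.mpr ⟨by simp, ?_⟩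
    rw [ih (x / 2)]
    apply List.map_congr_left
    intro i _
    have hsh : x >>> (i + 1) = (x >>> 1) >>> i := by
      rw [Nat.add_comm, Nat.shiftRight_add]
    simp only [Function.comp, Nat.succ_eq_add_one, hsh, Nat.shiftRight_one]

theorem int2bv_eq (x n : Nat) : int2bv x n = int2bv_alt x n := by
  rw [int2bv, int2bv_alt, i2bvGo_eq, List.map_reverse]

theorem ii_go_nongray (f : Nat) : ∀ lo hi n, lo ≤ hi → hi + 1 - lo ≤ f →
    ii_go f lo hi n false = List.range' lo (hi + 1 - lo) := by
  induction f with
  | zero => intro lo hi n h1 h2; omega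
  | succ f ih =>
    intro lo hi n h1 h2
    rw [ii_go]
    by_cases he : lo = hi
    · subst he
      simp [List.range'_succ]
    · rw [if_neg he]
      have hstep : increment_index lo 1 n false = lo + 1 := by
        simp [increment_index]
      rw [hstep]
      rw [ih (lo + 1) hi n (by omega) (by omega)]
      have hlen : hi + 1 - lo = (hi - lo) + 1 := by omega
      rw [hlen, List.range'_succ]
      have harg : hi + 1 - (lo + 1) = hi - lo := by omega
      rw [harg]

theorem ii_go_gray (f : Nat) : ∀ i c hi n,
    i = bintogray (c % 2 ^ n) → pxor i = c % 2 ^ n →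
    (ii_go f i hi n true).map (fun x => int2bv x n) = grayGo f c hi n := by
  induction f with
  | zero => intro i c hi n _ _; simp [ii_go, grayGo]
  | succ f ih =>
    intro i c hi n h1 h2
    rw [ii_go, grayGo]
    have hg : (c % 2 ^ n) ^^^ ((c % 2 ^ n) >>> 1) = i := by
      rw [h1]; rfl
    by_cases he : i = hi
    · subst he
      rw [if_pos rfl, hg, if_pos rfl]
      simp [int2bv_eq]
    · have hmod : (c % 2 ^ n + 1) % 2 ^ n = (c + 1) % 2 ^ n := by
        conv_rhs => rw [Nat.add_mod]
        rw [Nat.add_mod (c % 2 ^ n), Nat.mod_mod_of_dvd c (dvd_refl (2 ^ n))]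
      have hstep : increment_index i 1 n true = bintogray ((c + 1) % 2 ^ n) := by
        rw [increment_index, if_pos rfl, graytobin_eq, h2, hmod]
      rw [if_neg he, hg, if_neg he, List.map_cons]
      refine List.cons_eq_cons.mpr ⟨int2bv_eq i n, ?_⟩
      apply ih
      · exact hstep
      · rw [hstep]
        rw [show bintogray ((c + 1) % 2 ^ n) = ((c + 1) % 2 ^ n) ^^^ (((c + 1) % 2 ^ n) >>> 1) from rfl]
        exact pxor_bintogray _

-- ===== VERDICT (by name: the statement is the Claim_ definition above) =====
theorem bv_interval_spec : Claim_equal_bv_interval := by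
  intro lb ub g _ hpre
  have hpre' : lb.length = ub.length := hpre
  unfold Spec_bv_interval
  simp only [bv_interval, bv_interval_alt, bv2int_eq, bits2int_eq]
  cases g with
  | true =>
    have hA : (!true && pyListGt lb ub) = false := by simp
    rw [hA, if_neg (by decide), if_pos rfl, index_interval]
    have hlt : pxor (numMSB lb) < 2 ^ lb.length := pxor_lt (numMSB_lt lb)
    apply ii_go_gray
    · rw [gtb_alt_eq, Nat.zero_xor, Nat.mod_eq_of_lt hlt]
      exact (bintogray_pxor (numMSB lb)).symm
    · rw [gtb_alt_eq, Nat.zero_xor, Nat.mod_eq_of_lt hlt]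
  | false =>
    have hA : (!false && pyListGt lb ub) = pyListGt lb ub := by simp
    rw [hA, pyListGt_iff lb ub hpre']
    by_cases hc : numMSB ub < numMSB lb
    · simp [hc]
    · rw [decide_eq_false hc, if_neg (by decide), if_neg (by decide), if_neg hc]
      have hub : numMSB ub < 2 ^ lb.length := by rw [hpre']; exact numMSB_lt ub
      rw [index_interval, ii_go_nongray _ _ _ _ (by omega) (by omega)]
      rw [List.range'_eq_map_range, List.map_map]
      apply List.map_congr_left
      intro k _
      simp only [Function.comp, int2bv_eq]

theorem bv_interval_witness_ok :
    Dom_bv_interval pvWitness_bv_interval.1 pvWitness_bv_interval.2.1 pvWitness_bv_interval.2.2 ∧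
    Pre_bv_interval pvWitness_bv_interval.1 pvWitness_bv_interval.2.1 pvWitness_bv_interval.2.2 := by
  constructor <;> decide
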